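-- pv_equiv track=rewrite | github.com/stevenmburns/adventofcode | 2019/22/test_A.py | power_compose
-- ===== SOURCE A (Python) =====
-- def compose( g, f):
--     p, q, m = f
--     u, v, m2 = g
--     assert m == m2
--     return (u+v*p)%m, (v*q)%m, m
--
-- def power_compose( f, n):
--     p, q, m = f
--     y = 0, 1, m
--     while n > 0:
--         if n % 2 == 0:
--             f = compose( f, f)
--             n = n // 2
--         else:
--             y = compose( f, y)
--             n = n - 1
--     return y
-- ===== SOURCE B (Python) =====
-- def compose(g, f):
--     p, q, m = f
--     u, v, m2 = g
--     assert m == m2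
--     return (u+v*p) % m, (v*q) % m, m
--
-- def power_compose(f, n):
--     p, q, m = f
--     bits = []
--     while n > 0:
--         bits.append(n % 2)
--         n //= 2
--     y = (0, 1, m)
--     for b in reversed(bits):
--         y = compose(y, y)
--         if b:
--             y = compose(f, y)
--     return y
-- ===== Notes on version B (the rewrite author's own statement) =====
-- stated objective: alternative
-- what changed: Replaces A's single while-loop that interleaves squaring the base accumulator with folding odd factors into the result by a two-stage left-to-right square-and-multiply: first build the list of binary digits of n, then fold over the bits most-significant-first, squaring the result and composing f in when the bit is set; correct because compose is a monoid operation, so standard MSB-first exponentiation computes the same power.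
import Mathlib
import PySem

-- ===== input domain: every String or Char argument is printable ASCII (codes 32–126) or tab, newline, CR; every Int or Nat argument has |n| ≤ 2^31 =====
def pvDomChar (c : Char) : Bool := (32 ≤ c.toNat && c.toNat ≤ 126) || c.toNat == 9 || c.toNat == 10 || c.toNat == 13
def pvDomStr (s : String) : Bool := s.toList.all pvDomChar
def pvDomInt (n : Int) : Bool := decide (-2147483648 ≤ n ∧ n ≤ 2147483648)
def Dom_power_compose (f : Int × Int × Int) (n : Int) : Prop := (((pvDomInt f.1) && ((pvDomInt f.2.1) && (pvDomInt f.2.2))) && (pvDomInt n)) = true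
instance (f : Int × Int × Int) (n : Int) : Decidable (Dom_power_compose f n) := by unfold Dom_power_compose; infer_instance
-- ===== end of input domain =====

-- B replaces A's single interleaved while-loop by a two-stage left-to-right square-and-multiply:
-- build n's bit list, then fold most-significant-first (alternative decomposition, same cost).


-- ===== PORT A =====
-- compose(g, f): the assert m == m2 always holds at every call site inside power_compose
-- (both triples carry the same modulus), so it is not modelled.
def pyComposeA (g f : Int × Int × Int) : Int × Int × Int :=
  (PySem.Int.mod (g.1 + g.2.1 * f.1) f.2.2, PySem.Int.mod (g.2.1 * f.2.1) f.2.2, f.2.2)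

-- the while-loop of A, state (f, y, n)
def powerComposeLoop (f y : Int × Int × Int) (n : Int) : Int × Int × Int :=
  if h : 0 < n then
    if _h2 : PySem.Int.mod n 2 = 0 then
      powerComposeLoop (pyComposeA f f) y (PySem.Int.floordiv n 2)
    else
      powerComposeLoop f (pyComposeA f y) (n - 1)
  else y
termination_by n.toNat
decreasing_by
  · rw [PySem.Int.floordiv_eq_ediv_of_pos (by omega : (0:Int) < 2)]; omega
  · omega

def power_compose (f : Int × Int × Int) (n : Int) : Int × Int × Int :=
  powerComposeLoop f (0, 1, f.2.2) n

-- ===== PORT B =====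
-- Source B's identical compose helper
def pyComposeB (g f : Int × Int × Int) : Int × Int × Int :=
  (PySem.Int.mod (g.1 + g.2.1 * f.1) f.2.2, PySem.Int.mod (g.2.1 * f.2.1) f.2.2, f.2.2)

-- stage 1 of Source B: the bit list of n, least-significant first (append order)
def bitsLoop (n : Int) : List Int :=
  if _h : 0 < n then PySem.Int.mod n 2 :: bitsLoop (PySem.Int.floordiv n 2) else []
termination_by n.toNat
decreasing_by
  rw [PySem.Int.floordiv_eq_ediv_of_pos (by omega : (0:Int) < 2)]; omega

-- body of Source B's for-loop over reversed(bits)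
def stepB (f y : Int × Int × Int) (b : Int) : Int × Int × Int :=
  let y2 := pyComposeB y y
  if b ≠ 0 then pyComposeB f y2 else y2

def power_compose_alt (f : Int × Int × Int) (n : Int) : Int × Int × Int :=
  (bitsLoop n).reverse.foldl (stepB f) (0, 1, f.2.2)

-- ===== PRECONDITION & SPEC =====
-- Pre_ excludes exactly the inputs where A raises: n > 0 with modulus 0 hits `% 0`
-- (ZeroDivisionError); B raises there too.
def Pre_power_compose (f : Int × Int × Int) (n : Int) : Prop := 0 < n → f.2.2 ≠ 0
instance (f : Int × Int × Int) (n : Int) : Decidable (Pre_power_compose f n) := by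
  unfold Pre_power_compose; infer_instance

def pvWitness_power_compose : (Int × Int × Int) × Int := ((2, 3, 5), 6)

def Spec_power_compose (f : Int × Int × Int) (n : Int) (out : Int × Int × Int) : Prop := out = power_compose_alt f n
instance (f : Int × Int × Int) (n : Int) (out : Int × Int × Int) : Decidable (Spec_power_compose f n out) := by unfold Spec_power_compose; infer_instance

-- ===== CLAIM (what is proved, stated in full; the proofs are below) =====
def Claim_equal_power_compose : Prop := ∀ (f : Int × Int × Int) (n : Int), Dom_power_compose f n → Pre_power_compose f n → Spec_power_compose f n (power_compose f n)

-- ===== LEMMAS AND PROOFS =====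

-- exact (unreduced) affine composition, powers, and Python-mod reduction
def cz (g f : Int × Int) : Int × Int := (g.1 + g.2 * f.1, g.2 * f.2)

def Ez (f : Int × Int) : Nat → Int × Int
  | 0 => (0, 1)
  | k + 1 => cz f (Ez f k)

def rd (m : Int) (a : Int × Int) : Int × Int := (PySem.Int.mod a.1 m, PySem.Int.mod a.2 m)

def prj (t : Int × Int × Int) : Int × Int := (t.1, t.2.1)

def att (m : Int) (a : Int × Int) : Int × Int × Int := (a.1, a.2, m)

-- the number whose binary digits (MSB first) are u, appended after prefix value k
def valMSB (k : Nat) (u : List Int) : Nat :=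
  u.foldl (fun k b => 2 * k + (if b = 0 then 0 else 1)) k

theorem pymod_sub_dvd (a m : Int) : m ∣ a - PySem.Int.mod a m := by
  refine ⟨PySem.Int.floordiv a m, ?_⟩
  have h := PySem.Int.floordiv_mul_add_mod a m
  linarith [h]

theorem pymod_congr {m a b : Int} (hm : m ≠ 0) (h : m ∣ a - b) :
    PySem.Int.mod a m = PySem.Int.mod b m := by
  have ha := pymod_sub_dvd a m
  have hb := pymod_sub_dvd b m
  have hd : m ∣ PySem.Int.mod a m - PySem.Int.mod b m := by
    have : PySem.Int.mod a m - PySem.Int.mod b m = (a - b) - (a - PySem.Int.mod a m) + (b - PySem.Int.mod b m) := by ring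
    rw [this]; exact dvd_add (dvd_sub h ha) hb
  have habs : |PySem.Int.mod a m - PySem.Int.mod b m| < |m| := by
    rcases lt_or_gt_of_ne hm with hneg | hpos
    · have b1 := PySem.Int.mod_neg_bounds a hneg
      have b2 := PySem.Int.mod_neg_bounds b hneg
      rw [abs_of_neg hneg, abs_lt]; omega
    · have b1 := PySem.Int.mod_nonneg a hpos
      have b2 := PySem.Int.mod_nonneg b hpos
      have c1 := PySem.Int.mod_lt a hpos
      have c2 := PySem.Int.mod_lt b hpos
      rw [abs_of_pos hpos, abs_lt]; omega
  have := Int.eq_zero_of_abs_lt_dvd ((abs_dvd m _).mpr hd) habs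
  omega

theorem pymod_idem {m : Int} (hm : m ≠ 0) (a : Int) :
    PySem.Int.mod (PySem.Int.mod a m) m = PySem.Int.mod a m := by
  refine pymod_congr hm ?_
  have := pymod_sub_dvd a m
  have h2 : PySem.Int.mod a m - a = -(a - PySem.Int.mod a m) := by ring
  rw [h2]; exact dvd_neg.mpr this

theorem dvd_of_pymod_eq {m a b : Int} (h : PySem.Int.mod a m = PySem.Int.mod b m) :
    m ∣ a - b := by
  have ha := pymod_sub_dvd a m
  have hb := pymod_sub_dvd b m
  have : a - b = (a - PySem.Int.mod a m) - (b - PySem.Int.mod b m) := by rw [h]; ring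
  rw [this]; exact dvd_sub ha hb

theorem rd_idem {m : Int} (hm : m ≠ 0) (a : Int × Int) : rd m (rd m a) = rd m a := by
  simp [rd, pymod_idem hm]

theorem rd_cz_congr {m : Int} (hm : m ≠ 0) {a a' b b' : Int × Int}
    (h1 : rd m a = rd m a') (h2 : rd m b = rd m b') :
    rd m (cz a b) = rd m (cz a' b') := by
  have e11 : PySem.Int.mod a.1 m = PySem.Int.mod a'.1 m := congrArg Prod.fst h1
  have e12 : PySem.Int.mod a.2 m = PySem.Int.mod a'.2 m := congrArg Prod.snd h1
  have e21 : PySem.Int.mod b.1 m = PySem.Int.mod b'.1 m := congrArg Prod.fst h2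
  have e22 : PySem.Int.mod b.2 m = PySem.Int.mod b'.2 m := congrArg Prod.snd h2
  have d11 := dvd_of_pymod_eq e11
  have d12 := dvd_of_pymod_eq e12
  have d21 := dvd_of_pymod_eq e21
  have d22 := dvd_of_pymod_eq e22
  unfold rd cz
  refine Prod.ext ?_ ?_
  · refine pymod_congr hm ?_
    have : (a.1 + a.2 * b.1) - (a'.1 + a'.2 * b'.1)
         = (a.1 - a'.1) + (b.1 * (a.2 - a'.2) + a'.2 * (b.1 - b'.1)) := by ring
    rw [this]
    exact dvd_add d11 (dvd_add (Dvd.dvd.mul_left d12 _) (Dvd.dvd.mul_left d21 _))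
  · refine pymod_congr hm ?_
    have : a.2 * b.2 - a'.2 * b'.2 = b.2 * (a.2 - a'.2) + a'.2 * (b.2 - b'.2) := by ring
    rw [this]
    exact dvd_add (Dvd.dvd.mul_left d12 _) (Dvd.dvd.mul_left d22 _)

theorem cz_assoc (x y z : Int × Int) : cz x (cz y z) = cz (cz x y) z := by
  unfold cz; exact Prod.ext (by ring) (by ring)

theorem cz_id_right (g : Int × Int) : cz g (0, 1) = g := by
  unfold cz; exact Prod.ext (by ring) (by ring)

theorem cz_id_left (f : Int × Int) : cz (0, 1) f = f := by
  unfold cz; exact Prod.ext (by ring) (by ring)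

theorem Ez_add (f : Int × Int) (a b : Nat) : Ez f (a + b) = cz (Ez f a) (Ez f b) := by
  induction a with
  | zero => simp [Ez, cz_id_left]
  | succ a ih =>
      have : a + 1 + b = (a + b) + 1 := by omega
      rw [this]
      show cz f (Ez f (a + b)) = cz (cz f (Ez f a)) (Ez f b)
      rw [ih, cz_assoc]

theorem Ez_one (f : Int × Int) : Ez f 1 = f := by
  show cz f (0, 1) = f
  exact cz_id_right f

theorem Ez_comm (f : Int × Int) (k : Nat) : cz (Ez f k) f = cz f (Ez f k) := by
  have h := Ez_add f k 1
  rw [Ez_one] at h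
  rw [← h]
  rfl

theorem Ez_double (f : Int × Int) (k : Nat) : Ez (cz f f) k = Ez f (k + k) := by
  induction k with
  | zero => rfl
  | succ k ih =>
      show cz (cz f f) (Ez (cz f f) k) = Ez f (k + 1 + (k + 1))
      rw [ih]
      have h2 : Ez f 2 = cz f f := by
        show cz f (cz f (0,1)) = cz f f
        rw [cz_id_right]
      have : k + 1 + (k + 1) = 2 + (k + k) := by omega
      rw [this, Ez_add f 2 (k + k), h2]

theorem rd_Ez_congr {m : Int} (hm : m ≠ 0) {f f' : Int × Int} (h : rd m f = rd m f') :
    ∀ k, rd m (Ez f k) = rd m (Ez f' k)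
  | 0 => rfl
  | k + 1 => by
      show rd m (cz f (Ez f k)) = rd m (cz f' (Ez f' k))
      exact rd_cz_congr hm h (rd_Ez_congr hm h k)

theorem pyComposeA_eq (g f : Int × Int × Int) :
    pyComposeA g f = att f.2.2 (rd f.2.2 (cz (prj g) (prj f))) := rfl

theorem pyComposeB_eq (g f : Int × Int × Int) :
    pyComposeB g f = att f.2.2 (rd f.2.2 (cz (prj g) (prj f))) := rfl

-- loop invariant for A's while loop (n > 0; both triples carry modulus m ≠ 0)
theorem loopA (m : Int) (hm : m ≠ 0) :
    ∀ k (n : Int), n.toNat = k → 0 < n → ∀ (f y : Int × Int × Int),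
      f.2.2 = m → y.2.2 = m →
      powerComposeLoop f y n = att m (rd m (cz (Ez (prj f) n.toNat) (prj y))) := by
  intro k
  induction k using Nat.strong_induction_on with
  | _ k ih =>
    intro n hk hn f y hf hy
    rw [powerComposeLoop]
    rw [dif_pos hn]
    by_cases h2 : PySem.Int.mod n 2 = 0
    · rw [dif_pos h2]
      have hdvd : (2 : Int) ∣ n := (PySem.Int.mod_eq_zero_iff_dvd n 2).mp h2
      have hfd : PySem.Int.floordiv n 2 = n / 2 :=
        PySem.Int.floordiv_eq_ediv_of_pos (by omega)
      have hpos : 0 < n / 2 := by omega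
      have hlt : (n / 2).toNat < k := by omega
      have hf2 : (pyComposeA f f).2.2 = m := by rw [pyComposeA_eq, hf]; rfl
      rw [hfd]
      rw [ih (n / 2).toNat hlt (n / 2) rfl hpos (pyComposeA f f) y hf2 hy]
      congr 1
      have hpr : prj (pyComposeA f f) = rd m (cz (prj f) (prj f)) := by
        rw [pyComposeA_eq, hf]; rfl
      have hE : rd m (Ez (prj (pyComposeA f f)) ((n / 2).toNat))
              = rd m (Ez (prj f) n.toNat) := by
        rw [hpr]
        have := rd_Ez_congr hm (rd_idem hm (cz (prj f) (prj f))) ((n / 2).toNat)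
        rw [this, Ez_double]
        have : (n / 2).toNat + (n / 2).toNat = n.toNat := by omega
        rw [this]
      exact rd_cz_congr hm hE rfl
    · rw [dif_neg h2]
      have hy2 : (pyComposeA f y).2.2 = m := by rw [pyComposeA_eq, hy]; rfl
      have hpr : prj (pyComposeA f y) = rd m (cz (prj f) (prj y)) := by
        rw [pyComposeA_eq, hy]; rfl
      by_cases h1 : n = 1
      · subst h1
        rw [powerComposeLoop]
        rw [dif_neg (by omega : ¬ (0:Int) < 1 - 1)]
        rw [pyComposeA_eq, hy]
        show att m (rd m (cz (prj f) (prj y))) = att m (rd m (cz (Ez (prj f) 1) (prj y)))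
        rw [Ez_one]
      · have hn1 : 0 < n - 1 := by omega
        have hlt : (n - 1).toNat < k := by omega
        rw [ih (n - 1).toNat hlt (n - 1) rfl hn1 f (pyComposeA f y) hf hy2]
        congr 1
        rw [hpr]
        have step1 : rd m (cz (Ez (prj f) (n-1).toNat) (rd m (cz (prj f) (prj y))))
                   = rd m (cz (Ez (prj f) (n-1).toNat) (cz (prj f) (prj y))) :=
          rd_cz_congr hm rfl (rd_idem hm _)
        rw [step1, cz_assoc, Ez_comm]
        have : cz (prj f) (Ez (prj f) (n-1).toNat) = Ez (prj f) ((n-1).toNat + 1) := rfl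
        rw [this]
        have : (n-1).toNat + 1 = n.toNat := by omega
        rw [this]

-- one step of B's fold lands exactly on the reduced power with doubled-plus-bit exponent
theorem stepB_exact (m : Int) (hm : m ≠ 0) (f y : Int × Int × Int) (b : Int) (k : Nat)
    (hf : f.2.2 = m) (hy : y.2.2 = m)
    (hrd : rd m (prj y) = rd m (Ez (prj f) k)) :
    stepB f y b = att m (rd m (Ez (prj f) (2 * k + (if b = 0 then 0 else 1)))) := by
  have hy2 : pyComposeB y y = att m (rd m (Ez (prj f) (k + k))) := by
    rw [pyComposeB_eq, hy]
    congr 1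
    rw [rd_cz_congr hm hrd hrd, ← Ez_add]
  by_cases hb : b = 0
  · have he : 2 * k + (if b = 0 then 0 else 1) = k + k := by rw [if_pos hb]; omega
    rw [he]
    unfold stepB
    rw [if_neg (fun h => h hb)]
    exact hy2
  · have he : 2 * k + (if b = 0 then 0 else 1) = (k + k) + 1 := by rw [if_neg hb]; omega
    rw [he]
    unfold stepB
    rw [if_pos hb]
    rw [hy2, pyComposeB_eq]
    show att m (rd m (cz (prj f) (rd m (Ez (prj f) (k + k)))))
       = att m (rd m (Ez (prj f) ((k + k) + 1)))
    congr 1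
    rw [rd_cz_congr hm rfl (rd_idem hm _)]
    rfl

-- B's fold over a bit list, MSB first: nonempty lists land exactly on the att-form
theorem foldB (m : Int) (hm : m ≠ 0) (f : Int × Int × Int) (hf : f.2.2 = m) :
    ∀ (u : List Int) (y : Int × Int × Int) (k : Nat),
      y.2.2 = m → rd m (prj y) = rd m (Ez (prj f) k) →
      u.foldl (stepB f) y =
        (if u.isEmpty then y else att m (rd m (Ez (prj f) (valMSB k u)))) := by
  intro u
  induction u with
  | nil => intro y k _ _; rfl
  | cons b rest ih =>
      intro y k hy hrd
      have hstep := stepB_exact m hm f y b k hf hy hrd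
      have hy' : (stepB f y b).2.2 = m := by rw [hstep]; rfl
      have hrd' : rd m (prj (stepB f y b))
                = rd m (Ez (prj f) (2 * k + (if b = 0 then 0 else 1))) := by
        rw [hstep]
        exact rd_idem hm _
      show (rest.foldl (stepB f) (stepB f y b)) = _
      rw [ih (stepB f y b) (2 * k + (if b = 0 then 0 else 1)) hy' hrd']
      rw [if_neg (by simp : ¬ ((b :: rest).isEmpty = true))]
      by_cases hr : rest.isEmpty = true
      · rw [if_pos hr, hstep]
        have : rest = [] := List.isEmpty_iff.mp hr
        subst this
        rfl
      · rw [if_neg hr]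
        rfl

-- the reversed bit list of n encodes n.toNat
theorem bitsLoop_cons (n : Int) (hn : 0 < n) :
    bitsLoop n = PySem.Int.mod n 2 :: bitsLoop (PySem.Int.floordiv n 2) := by
  rw [bitsLoop]; rw [dif_pos hn]

theorem valMSB_append (k : Nat) (u : List Int) (b : Int) :
    valMSB k (u ++ [b]) = 2 * valMSB k u + (if b = 0 then 0 else 1) := by
  unfold valMSB
  rw [List.foldl_append]
  rfl

theorem valMSB_bits : ∀ k (n : Int), n.toNat = k → 0 ≤ n →
    valMSB 0 (bitsLoop n).reverse = n.toNat := by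
  intro k
  induction k using Nat.strong_induction_on with
  | _ k ih =>
    intro n hk hn0
    by_cases hn : 0 < n
    · rw [bitsLoop_cons n hn]
      have hfd : PySem.Int.floordiv n 2 = n / 2 :=
        PySem.Int.floordiv_eq_ediv_of_pos (by omega)
      have hmod : PySem.Int.mod n 2 = n % 2 :=
        PySem.Int.mod_eq_emod_of_pos (by omega)
      have hlt : (n / 2).toNat < k := by omega
      rw [List.reverse_cons, valMSB_append, hfd,
          ih (n / 2).toNat hlt (n / 2) rfl (by omega), hmod]
      have h2 : n % 2 = 0 ∨ n % 2 = 1 := by omega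
      rcases h2 with h2 | h2 <;> simp [h2] <;> omega
    · have : n = 0 := by omega
      subst this
      rw [bitsLoop]
      simp [valMSB]

theorem bitsLoop_ne_nil (n : Int) (hn : 0 < n) : (bitsLoop n).reverse ≠ [] := by
  rw [bitsLoop_cons n hn]
  simp

-- ===== VERDICT (by name: the statement is the Claim_ definition above) =====
theorem power_compose_spec : Claim_equal_power_compose := by
  unfold Claim_equal_power_compose
  intro f n _ hpre
  unfold Spec_power_compose
  by_cases hn : 0 < n
  · have hm : f.2.2 ≠ 0 := hpre hn
    have hA := loopA f.2.2 hm n.toNat n rfl hn f (0, 1, f.2.2) rfl rfl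
    have hB := foldB f.2.2 hm f rfl (bitsLoop n).reverse (0, 1, f.2.2) 0 rfl rfl
    rw [power_compose, hA]
    rw [power_compose_alt, hB]
    rw [if_neg (fun h => bitsLoop_ne_nil n hn (List.isEmpty_iff.mp h))]
    rw [valMSB_bits n.toNat n rfl (by omega)]
    congr 1
    have : prj (0, 1, f.2.2) = ((0 : Int), (1 : Int)) := rfl
    rw [this, cz_id_right]
  · rw [power_compose, powerComposeLoop, dif_neg hn]
    rw [power_compose_alt, bitsLoop, dif_neg hn]
    rfl
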